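-- pv_equiv track=rewrite | github.com/khvedant02/Vedant-CSCE590-submission | Project Report and Paper Report/EDA.py | posVector
-- ===== SOURCE A (Python) =====
-- def posVector(tagged_words):
--     vector = list()
--     for tag in ['NNP', 'DT', 'IN', 'JJ','NN', 'NNS']:
--         temp = 0
--         for tup in tagged_words:
--             if(tup[1] == tag and temp==0):
--                 vector.append(1)
--                 temp = 1
--             else:
--                 continue
--         if temp==1:
--             continue
--         else:
--             vector.append(0)
--
--     return vector
-- ===== SOURCE B (Python) =====
-- def posVector(tagged_words):
--     tags = ('NNP', 'DT', 'IN', 'JJ', 'NN', 'NNS')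
--     index = {t: i for i, t in enumerate(tags)}
--     vector = [0] * 6
--     remaining = 6
--     for tup in tagged_words:
--         i = index.get(tup[1])
--         if i is not None and vector[i] == 0:
--             vector[i] = 1
--             remaining -= 1
--             if remaining == 0:
--                 break
--     return vector
-- ===== Notes on version B (the rewrite author's own statement) =====
-- stated objective: alternative
-- what changed: Replaces A's six per-tag full scans of tagged_words (appending bits mid-scan with a temp flag) by a single pass over tagged_words that updates a preallocated 6-slot vector in place via a tag-to-position dict and breaks early once all six tags have been seen.
import Mathlib
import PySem

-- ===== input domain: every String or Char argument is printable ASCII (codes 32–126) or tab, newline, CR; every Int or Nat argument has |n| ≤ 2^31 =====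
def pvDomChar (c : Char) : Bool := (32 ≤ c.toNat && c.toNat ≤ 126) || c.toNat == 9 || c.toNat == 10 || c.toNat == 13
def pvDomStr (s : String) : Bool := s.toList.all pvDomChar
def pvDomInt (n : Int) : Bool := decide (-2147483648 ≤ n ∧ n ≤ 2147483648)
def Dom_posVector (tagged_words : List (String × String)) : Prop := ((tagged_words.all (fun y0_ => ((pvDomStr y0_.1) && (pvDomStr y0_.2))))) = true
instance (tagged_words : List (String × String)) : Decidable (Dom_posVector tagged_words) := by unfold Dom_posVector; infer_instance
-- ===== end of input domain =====

-- B replaces A's six per-tag scans of tagged_words by ONE pass over tagged_words that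
-- updates a preallocated 6-slot vector through a tag→position index and stops early
-- once all six tags have been seen (objective: alternative single-pass algorithm).

-- ===== PORT A =====
-- inner 'for tup in tagged_words' loop body: state = (vector, temp)
def posVectorStep (tag : String) (st : List Int × Int) (tup : String × String) : List Int × Int :=
  if tup.2 == tag && st.2 == 0 then (st.1 ++ [1], 1) else st

def posVector (tagged_words : List (String × String)) : List Int :=
  (["NNP", "DT", "IN", "JJ", "NN", "NNS"].foldl
    (fun vector tag =>
      let st := tagged_words.foldl (posVectorStep tag) (vector, 0)
      if st.2 == 1 then st.1 else st.1 ++ [0])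
    [])

-- ===== PORT B =====
-- tags = ('NNP', 'DT', 'IN', 'JJ', 'NN', 'NNS')
def pvTags : List String := ["NNP", "DT", "IN", "JJ", "NN", "NNS"]

-- index = {t: i for i, t in enumerate(tags)}
def pvIndexB : PySem.Dict String Int :=
  (PySem.List.enumerate pvTags 0).foldl (fun d p => PySem.Dict.insert d p.2 p.1) PySem.Dict.empty

-- the 'for tup in tagged_words' loop; 'break' becomes returning the vector early
def posVectorAltLoop (vector : List Int) (remaining : Int) :
    List (String × String) → List Int
  | [] => vector
  | tup :: rest =>
    match PySem.Dict.get? pvIndexB tup.2 with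
    | some i =>
      if PySem.List.pyGetD vector i 0 == 0 then
        let v' := PySem.List.pySetD vector i 1
        if remaining - 1 == 0 then v'
        else posVectorAltLoop v' (remaining - 1) rest
      else posVectorAltLoop vector remaining rest
    | none => posVectorAltLoop vector remaining rest

def posVector_alt (tagged_words : List (String × String)) : List Int :=
  posVectorAltLoop (List.replicate 6 0) 6 tagged_words

-- ===== PRECONDITION & SPEC =====
def Spec_posVector (tagged_words : List (String × String)) (out : List Int) : Prop := out = posVector_alt tagged_words
instance (tagged_words : List (String × String)) (out : List Int) : Decidable (Spec_posVector tagged_words out) := by unfold Spec_posVector; infer_instance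

-- ===== CLAIM (what is proved, stated in full; the proofs are below) =====
def Claim_equal_posVector : Prop := ∀ (tagged_words : List (String × String)), Dom_posVector tagged_words → Spec_posVector tagged_words (posVector tagged_words)

-- ===== LEMMAS AND PROOFS =====

-- the presence bit of one tag, the presence vector of a word list, and its total
def pvMarkTag (ys : List (String × String)) (t : String) : Int :=
  if t ∈ ys.map Prod.snd then 1 else 0
def pvMark (ys : List (String × String)) : List Int := pvTags.map (pvMarkTag ys)
def pvCnt (ys : List (String × String)) : Int := (pvMark ys).sum

-- ---- A-side characterisation: posVector computes the six presence bits ----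

theorem posVector_inner_done (tag : String) (xs : List (String × String)) (v : List Int) :
    xs.foldl (posVectorStep tag) (v, 1) = (v, 1) := by
  induction xs with
  | nil => rfl
  | cons x xs ih => simp [List.foldl, posVectorStep, ih]

theorem posVector_inner (tag : String) (xs : List (String × String)) (v : List Int) :
    xs.foldl (posVectorStep tag) (v, 0) =
      if tag ∈ xs.map (fun tup => tup.2) then (v ++ [1], 1) else (v, 0) := by
  induction xs generalizing v with
  | nil => simp
  | cons x xs ih =>
    by_cases h : x.2 = tag
    · simp [List.foldl, posVectorStep, h, posVector_inner_done]
    · have h' : tag ≠ x.2 := fun e => h e.symm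
      have hstep : posVectorStep tag (v, 0) x = (v, 0) := by simp [posVectorStep, h]
      rw [List.foldl_cons, hstep, ih, List.map_cons]
      by_cases hm : tag ∈ List.map (fun tup => tup.2) xs <;> simp [hm, h']

theorem posVector_outer (tag : String) (xs : List (String × String)) (v : List Int) :
    (let st := xs.foldl (posVectorStep tag) (v, 0)
     if st.2 == 1 then st.1 else st.1 ++ [0]) =
      v ++ [pvMarkTag xs tag] := by
  rw [posVector_inner]
  by_cases h : tag ∈ xs.map (fun tup => tup.2) <;> simp [h, pvMarkTag]

theorem posVector_eq_mark (xs : List (String × String)) : posVector xs = pvMark xs := by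
  unfold posVector
  simp only [List.foldl, posVector_outer]
  simp [pvMark, pvTags]

-- ---- B-side: the single-pass loop reaches the same presence vector ----

theorem get_pvIndexB (s : String) :
    PySem.Dict.get? pvIndexB s =
      if s = "NNP" then some 0 else if s = "DT" then some 1 else if s = "IN" then some 2
      else if s = "JJ" then some 3 else if s = "NN" then some 4 else if s = "NNS" then some 5
      else none := by
  have h : pvIndexB = PySem.Dict.mk
      [("NNP", 0), ("DT", 1), ("IN", 2), ("JJ", 3), ("NN", 4), ("NNS", 5)] := by decide
  rw [h]
  simp only [PySem.Dict.get?_mk_cons, beq_iff_eq]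
  by_cases h1 : s = "NNP" <;> by_cases h2 : s = "DT" <;> by_cases h3 : s = "IN" <;>
    by_cases h4 : s = "JJ" <;> by_cases h5 : s = "NN" <;> by_cases h6 : s = "NNS" <;>
    simp_all [PySem.Dict.get?, eq_comm]

theorem pvMarkTag_append_one (seen : List (String × String)) (x : String × String) (t : String) :
    pvMarkTag (seen ++ [x]) t = if t = x.2 then 1 else pvMarkTag seen t := by
  unfold pvMarkTag
  rw [List.map_append, List.map_singleton]
  by_cases ht : t = x.2
  · simp [ht]
  · have h : (t ∈ List.map Prod.snd seen ++ [x.2]) ↔ (t ∈ List.map Prod.snd seen) := by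
      simp [List.mem_append, ht]
    simp only [h, ht, if_false]

theorem pvMark_full (ys rest : List (String × String)) (h : pvCnt ys = 6) :
    pvMark (ys ++ rest) = pvMark ys := by
  simp only [pvCnt, pvMark, pvMarkTag, pvTags, List.map, List.sum_cons, List.sum_nil] at h ⊢
  by_cases m1 : "NNP" ∈ ys.map Prod.snd <;> by_cases m2 : "DT" ∈ ys.map Prod.snd <;>
    by_cases m3 : "IN" ∈ ys.map Prod.snd <;> by_cases m4 : "JJ" ∈ ys.map Prod.snd <;>
    by_cases m5 : "NN" ∈ ys.map Prod.snd <;> by_cases m6 : "NNS" ∈ ys.map Prod.snd <;>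
    simp_all

theorem posVectorAltLoop_inv (xs : List (String × String)) :
    ∀ seen : List (String × String),
      posVectorAltLoop (pvMark seen) (6 - pvCnt seen) xs = pvMark (seen ++ xs) := by
  induction xs with
  | nil => intro seen; simp [posVectorAltLoop]
  | cons x rest ih =>
    intro seen
    rw [show seen ++ x :: rest = (seen ++ [x]) ++ rest by simp]
    simp only [posVectorAltLoop]
    rw [get_pvIndexB x.2]
    by_cases h1 : x.2 = "NNP"
    · rw [if_pos h1]
      simp only []
      have hget : PySem.List.pyGetD (pvMark seen) 0 0 = pvMarkTag seen "NNP" := by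
        simp [pvMark, pvTags, PySem.List.pyGetD_ofNat', PySem.List.pyGetD_zero]
      rw [hget]
      by_cases hm : "NNP" ∈ seen.map Prod.snd
      · rw [if_neg (by simp [pvMarkTag, hm])]
        have hmark : pvMark (seen ++ [x]) = pvMark seen := by
          unfold pvMark
          apply List.map_congr_left
          intro t _
          rw [pvMarkTag_append_one]
          by_cases htx : t = x.2
          · rw [if_pos htx, htx, h1]; simp [pvMarkTag, hm]
          · rw [if_neg htx]
        have hcnt : pvCnt (seen ++ [x]) = pvCnt seen := by unfold pvCnt; rw [hmark]
        rw [← hmark, ← hcnt, ih (seen ++ [x])]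
      · rw [if_pos (by simp [pvMarkTag, hm])]
        have hmark1 : PySem.List.pySetD (pvMark seen) 0 1 = pvMark (seen ++ [x]) := by
          simp [PySem.List.pySetD_of_nonneg, pvMark, pvTags, pvMarkTag_append_one, h1, List.set]
        have hcnt1 : pvCnt (seen ++ [x]) = pvCnt seen + 1 := by
          simp only [pvCnt, pvMark, pvTags, List.map, List.sum_cons, List.sum_nil,
            pvMarkTag_append_one, h1]
          have hd : pvMarkTag seen "NNP" = 0 := by simp [pvMarkTag, hm]
          simp [hd]
          try ring
        simp only [hmark1]
        by_cases hz : (6 : Int) - pvCnt seen - 1 = 0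
        · rw [if_pos (by simp [hz])]
          rw [pvMark_full (seen ++ [x]) rest (by rw [hcnt1]; omega)]
        · rw [if_neg (by simp [hz])]
          have h6 : (6 : Int) - pvCnt seen - 1 = 6 - pvCnt (seen ++ [x]) := by rw [hcnt1]; ring
          rw [h6, ih (seen ++ [x])]
    · rw [if_neg h1]
      by_cases h2 : x.2 = "DT"
      · rw [if_pos h2]
        simp only []
        have hget : PySem.List.pyGetD (pvMark seen) 1 0 = pvMarkTag seen "DT" := by
          simp [pvMark, pvTags, PySem.List.pyGetD_ofNat', PySem.List.pyGetD_zero]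
        rw [hget]
        by_cases hm : "DT" ∈ seen.map Prod.snd
        · rw [if_neg (by simp [pvMarkTag, hm])]
          have hmark : pvMark (seen ++ [x]) = pvMark seen := by
            unfold pvMark
            apply List.map_congr_left
            intro t _
            rw [pvMarkTag_append_one]
            by_cases htx : t = x.2
            · rw [if_pos htx, htx, h2]; simp [pvMarkTag, hm]
            · rw [if_neg htx]
          have hcnt : pvCnt (seen ++ [x]) = pvCnt seen := by unfold pvCnt; rw [hmark]
          rw [← hmark, ← hcnt, ih (seen ++ [x])]
        · rw [if_pos (by simp [pvMarkTag, hm])]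
          have hmark1 : PySem.List.pySetD (pvMark seen) 1 1 = pvMark (seen ++ [x]) := by
            simp [PySem.List.pySetD_of_nonneg, pvMark, pvTags, pvMarkTag_append_one, h2, List.set]
          have hcnt1 : pvCnt (seen ++ [x]) = pvCnt seen + 1 := by
            simp only [pvCnt, pvMark, pvTags, List.map, List.sum_cons, List.sum_nil,
              pvMarkTag_append_one, h2]
            have hd : pvMarkTag seen "DT" = 0 := by simp [pvMarkTag, hm]
            simp [hd]
            try ring
          simp only [hmark1]
          by_cases hz : (6 : Int) - pvCnt seen - 1 = 0
          · rw [if_pos (by simp [hz])]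
            rw [pvMark_full (seen ++ [x]) rest (by rw [hcnt1]; omega)]
          · rw [if_neg (by simp [hz])]
            have h6 : (6 : Int) - pvCnt seen - 1 = 6 - pvCnt (seen ++ [x]) := by rw [hcnt1]; ring
            rw [h6, ih (seen ++ [x])]
      · rw [if_neg h2]
        by_cases h3 : x.2 = "IN"
        · rw [if_pos h3]
          simp only []
          have hget : PySem.List.pyGetD (pvMark seen) 2 0 = pvMarkTag seen "IN" := by
            simp [pvMark, pvTags, PySem.List.pyGetD_ofNat', PySem.List.pyGetD_zero]
          rw [hget]
          by_cases hm : "IN" ∈ seen.map Prod.snd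
          · rw [if_neg (by simp [pvMarkTag, hm])]
            have hmark : pvMark (seen ++ [x]) = pvMark seen := by
              unfold pvMark
              apply List.map_congr_left
              intro t _
              rw [pvMarkTag_append_one]
              by_cases htx : t = x.2
              · rw [if_pos htx, htx, h3]; simp [pvMarkTag, hm]
              · rw [if_neg htx]
            have hcnt : pvCnt (seen ++ [x]) = pvCnt seen := by unfold pvCnt; rw [hmark]
            rw [← hmark, ← hcnt, ih (seen ++ [x])]
          · rw [if_pos (by simp [pvMarkTag, hm])]
            have hmark1 : PySem.List.pySetD (pvMark seen) 2 1 = pvMark (seen ++ [x]) := by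
              simp [PySem.List.pySetD_of_nonneg, pvMark, pvTags, pvMarkTag_append_one, h3, List.set]
            have hcnt1 : pvCnt (seen ++ [x]) = pvCnt seen + 1 := by
              simp only [pvCnt, pvMark, pvTags, List.map, List.sum_cons, List.sum_nil,
                pvMarkTag_append_one, h3]
              have hd : pvMarkTag seen "IN" = 0 := by simp [pvMarkTag, hm]
              simp [hd]
              try ring
            simp only [hmark1]
            by_cases hz : (6 : Int) - pvCnt seen - 1 = 0
            · rw [if_pos (by simp [hz])]
              rw [pvMark_full (seen ++ [x]) rest (by rw [hcnt1]; omega)]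
            · rw [if_neg (by simp [hz])]
              have h6 : (6 : Int) - pvCnt seen - 1 = 6 - pvCnt (seen ++ [x]) := by rw [hcnt1]; ring
              rw [h6, ih (seen ++ [x])]
        · rw [if_neg h3]
          by_cases h4 : x.2 = "JJ"
          · rw [if_pos h4]
            simp only []
            have hget : PySem.List.pyGetD (pvMark seen) 3 0 = pvMarkTag seen "JJ" := by
              simp [pvMark, pvTags, PySem.List.pyGetD_ofNat', PySem.List.pyGetD_zero]
            rw [hget]
            by_cases hm : "JJ" ∈ seen.map Prod.snd
            · rw [if_neg (by simp [pvMarkTag, hm])]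
              have hmark : pvMark (seen ++ [x]) = pvMark seen := by
                unfold pvMark
                apply List.map_congr_left
                intro t _
                rw [pvMarkTag_append_one]
                by_cases htx : t = x.2
                · rw [if_pos htx, htx, h4]; simp [pvMarkTag, hm]
                · rw [if_neg htx]
              have hcnt : pvCnt (seen ++ [x]) = pvCnt seen := by unfold pvCnt; rw [hmark]
              rw [← hmark, ← hcnt, ih (seen ++ [x])]
            · rw [if_pos (by simp [pvMarkTag, hm])]
              have hmark1 : PySem.List.pySetD (pvMark seen) 3 1 = pvMark (seen ++ [x]) := by
                simp [PySem.List.pySetD_of_nonneg, pvMark, pvTags, pvMarkTag_append_one, h4, List.set]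
              have hcnt1 : pvCnt (seen ++ [x]) = pvCnt seen + 1 := by
                simp only [pvCnt, pvMark, pvTags, List.map, List.sum_cons, List.sum_nil,
                  pvMarkTag_append_one, h4]
                have hd : pvMarkTag seen "JJ" = 0 := by simp [pvMarkTag, hm]
                simp [hd]
                try ring
              simp only [hmark1]
              by_cases hz : (6 : Int) - pvCnt seen - 1 = 0
              · rw [if_pos (by simp [hz])]
                rw [pvMark_full (seen ++ [x]) rest (by rw [hcnt1]; omega)]
              · rw [if_neg (by simp [hz])]
                have h6 : (6 : Int) - pvCnt seen - 1 = 6 - pvCnt (seen ++ [x]) := by rw [hcnt1]; ring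
                rw [h6, ih (seen ++ [x])]
          · rw [if_neg h4]
            by_cases h5 : x.2 = "NN"
            · rw [if_pos h5]
              simp only []
              have hget : PySem.List.pyGetD (pvMark seen) 4 0 = pvMarkTag seen "NN" := by
                simp [pvMark, pvTags, PySem.List.pyGetD_ofNat', PySem.List.pyGetD_zero]
              rw [hget]
              by_cases hm : "NN" ∈ seen.map Prod.snd
              · rw [if_neg (by simp [pvMarkTag, hm])]
                have hmark : pvMark (seen ++ [x]) = pvMark seen := by
                  unfold pvMark
                  apply List.map_congr_left
                  intro t _
                  rw [pvMarkTag_append_one]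
                  by_cases htx : t = x.2
                  · rw [if_pos htx, htx, h5]; simp [pvMarkTag, hm]
                  · rw [if_neg htx]
                have hcnt : pvCnt (seen ++ [x]) = pvCnt seen := by unfold pvCnt; rw [hmark]
                rw [← hmark, ← hcnt, ih (seen ++ [x])]
              · rw [if_pos (by simp [pvMarkTag, hm])]
                have hmark1 : PySem.List.pySetD (pvMark seen) 4 1 = pvMark (seen ++ [x]) := by
                  simp [PySem.List.pySetD_of_nonneg, pvMark, pvTags, pvMarkTag_append_one, h5, List.set]
                have hcnt1 : pvCnt (seen ++ [x]) = pvCnt seen + 1 := by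
                  simp only [pvCnt, pvMark, pvTags, List.map, List.sum_cons, List.sum_nil,
                    pvMarkTag_append_one, h5]
                  have hd : pvMarkTag seen "NN" = 0 := by simp [pvMarkTag, hm]
                  simp [hd]
                  try ring
                simp only [hmark1]
                by_cases hz : (6 : Int) - pvCnt seen - 1 = 0
                · rw [if_pos (by simp [hz])]
                  rw [pvMark_full (seen ++ [x]) rest (by rw [hcnt1]; omega)]
                · rw [if_neg (by simp [hz])]
                  have h6 : (6 : Int) - pvCnt seen - 1 = 6 - pvCnt (seen ++ [x]) := by rw [hcnt1]; ring
                  rw [h6, ih (seen ++ [x])]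
            · rw [if_neg h5]
              by_cases h6 : x.2 = "NNS"
              · rw [if_pos h6]
                simp only []
                have hget : PySem.List.pyGetD (pvMark seen) 5 0 = pvMarkTag seen "NNS" := by
                  simp [pvMark, pvTags, PySem.List.pyGetD_ofNat', PySem.List.pyGetD_zero]
                rw [hget]
                by_cases hm : "NNS" ∈ seen.map Prod.snd
                · rw [if_neg (by simp [pvMarkTag, hm])]
                  have hmark : pvMark (seen ++ [x]) = pvMark seen := by
                    unfold pvMark
                    apply List.map_congr_left
                    intro t _
                    rw [pvMarkTag_append_one]
                    by_cases htx : t = x.2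
                    · rw [if_pos htx, htx, h6]; simp [pvMarkTag, hm]
                    · rw [if_neg htx]
                  have hcnt : pvCnt (seen ++ [x]) = pvCnt seen := by unfold pvCnt; rw [hmark]
                  rw [← hmark, ← hcnt, ih (seen ++ [x])]
                · rw [if_pos (by simp [pvMarkTag, hm])]
                  have hmark1 : PySem.List.pySetD (pvMark seen) 5 1 = pvMark (seen ++ [x]) := by
                    simp [PySem.List.pySetD_of_nonneg, pvMark, pvTags, pvMarkTag_append_one, h6, List.set]
                  have hcnt1 : pvCnt (seen ++ [x]) = pvCnt seen + 1 := by
                    simp only [pvCnt, pvMark, pvTags, List.map, List.sum_cons, List.sum_nil,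
                      pvMarkTag_append_one, h6]
                    have hd : pvMarkTag seen "NNS" = 0 := by simp [pvMarkTag, hm]
                    simp [hd]
                    try ring
                  simp only [hmark1]
                  by_cases hz : (6 : Int) - pvCnt seen - 1 = 0
                  · rw [if_pos (by simp [hz])]
                    rw [pvMark_full (seen ++ [x]) rest (by rw [hcnt1]; omega)]
                  · rw [if_neg (by simp [hz])]
                    have h6 : (6 : Int) - pvCnt seen - 1 = 6 - pvCnt (seen ++ [x]) := by rw [hcnt1]; ring
                    rw [h6, ih (seen ++ [x])]
              · rw [if_neg h6]
                simp only []
                have hmark : pvMark (seen ++ [x]) = pvMark seen := by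
                  unfold pvMark
                  apply List.map_congr_left
                  intro t htmem
                  rw [pvMarkTag_append_one]
                  have hne : t ≠ x.2 := by
                    fin_cases htmem <;>
                      first
                      | exact Ne.symm h1 | exact Ne.symm h2 | exact Ne.symm h3
                      | exact Ne.symm h4 | exact Ne.symm h5 | exact Ne.symm h6
                  rw [if_neg hne]
                have hcnt : pvCnt (seen ++ [x]) = pvCnt seen := by unfold pvCnt; rw [hmark]
                rw [← hmark, ← hcnt, ih (seen ++ [x])]

-- ===== VERDICT (by name: the statement is the Claim_ definition above) =====
theorem posVector_spec : Claim_equal_posVector := by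
  intro xs _
  unfold Spec_posVector posVector_alt
  rw [posVector_eq_mark]
  have h := posVectorAltLoop_inv xs []
  have h0 : pvMark [] = List.replicate 6 0 := by decide
  have h1 : pvCnt [] = 0 := by decide
  rw [h0, h1, List.nil_append] at h
  simpa using h.symm
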